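-- pv_equiv track=rewrite | github.com/ArmandLedoux/tipe_qr | code/decodage.py | lecture_matrice
-- ===== SOURCE A (Python) =====
-- def zone_a_lire (x, y, n) :
--     if x < 8 and y < 8 :
--         return False
--     elif x < 8 and y >n-9 :
--         return False
--     elif x > n-9 and y<8 :
--         return False
--     else :
--         return True
--
-- def lecture_matrice (llqr) :
--     taille_qr = len(llqr[0])
--     lqr = []
--     for iqr in range(len(llqr)) :
--         qr = []
--         for x in range(taille_qr) :
--             for y in range(taille_qr) :
--                 if zone_a_lire(x,y,taille_qr) :
--                     qr.append(llqr[iqr][x][y])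
--         lqr.append(qr)
--     return lqr
-- ===== SOURCE B (Python) =====
-- def lecture_matrice(llqr):
--     n = len(llqr[0])
--     lqr = []
--     for mat in llqr:
--         qr = []
--         for x, row in enumerate(mat[:n]):
--             if x < 8:
--                 qr += row[8:max(0, n - 8)]
--             elif x > n - 9:
--                 qr += row[8:n]
--             else:
--                 qr += row[:n]
--         lqr.append(qr)
--     return lqr
-- ===== Notes on version B (the rewrite author's own statement) =====
-- stated objective: simpler
-- what changed: Replaced A's per-cell zone_a_lire predicate test inside an n×n double loop by a per-row computation of the readable column range, taking one contiguous slice per row (top band: cols 8..n-9, bottom band: cols 8..n-1, middle: all) and extending the result.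
import Mathlib
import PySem

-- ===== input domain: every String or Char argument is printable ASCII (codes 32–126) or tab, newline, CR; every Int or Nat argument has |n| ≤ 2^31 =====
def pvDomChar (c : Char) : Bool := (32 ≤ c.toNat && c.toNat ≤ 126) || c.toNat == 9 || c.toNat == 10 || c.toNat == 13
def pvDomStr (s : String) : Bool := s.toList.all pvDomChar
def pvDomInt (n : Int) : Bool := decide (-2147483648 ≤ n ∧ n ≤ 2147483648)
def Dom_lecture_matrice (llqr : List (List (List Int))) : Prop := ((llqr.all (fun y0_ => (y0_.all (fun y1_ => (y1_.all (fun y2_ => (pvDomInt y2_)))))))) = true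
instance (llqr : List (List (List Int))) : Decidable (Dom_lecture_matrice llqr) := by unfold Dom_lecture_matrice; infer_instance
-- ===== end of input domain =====

-- B replaces A's per-cell zone test (a double loop calling zone_a_lire on every cell)
-- by a per-row column-range computation: each row contributes one contiguous slice.
-- Objective: simpler (one slice per row instead of n predicate tests per row).

-- ===== PORT A =====
def zone_a_lire (x y n : Int) : Bool :=
  if x < 8 ∧ y < 8 then false
  else if x < 8 ∧ y > n - 9 then false
  else if x > n - 9 ∧ y < 8 then false
  else true

def lecture_matrice (llqr : List (List (List Int))) : List (List Int) :=
  let taille_qr : Int := ((PySem.List.pyGetD llqr 0 ([] : List (List Int))).length : Int)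
  (PySem.List.pyRange 0 (llqr.length : Int)).foldl
    (fun lqr iqr =>
      lqr ++ [(PySem.List.pyRange 0 taille_qr).foldl
        (fun qr x =>
          (PySem.List.pyRange 0 taille_qr).foldl
            (fun qr y =>
              if zone_a_lire x y taille_qr then
                qr ++ [PySem.List.pyGetD (PySem.List.pyGetD (PySem.List.pyGetD llqr iqr ([] : List (List Int))) x ([] : List Int)) y 0]
              else qr)
            qr)
        ([] : List Int)])
    []

-- ===== PORT B =====
def lecture_matrice_alt (llqr : List (List (List Int))) : List (List Int) :=
  let n : Int := ((PySem.List.pyGetD llqr 0 ([] : List (List Int))).length : Int)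
  llqr.foldl
    (fun lqr mat =>
      lqr ++ [(PySem.List.enumerate (PySem.List.slice mat none (some n))).foldl
        (fun qr p =>
          if p.1 < 8 then qr ++ PySem.List.slice p.2 (some 8) (some (max 0 (n - 8)))
          else if p.1 > n - 9 then qr ++ PySem.List.slice p.2 (some 8) (some n)
          else qr ++ PySem.List.slice p.2 none (some n))
        ([] : List Int)])
    []

-- ===== PRECONDITION & SPEC =====
-- Pre_ is exactly the set of inputs on which the Python A returns normally: llqr is
-- nonempty (A indexes llqr[0]), and when the first matrix's size n is ≥ 9 every matrix
-- must have ≥ n rows, its rows 8..n-1 must have ≥ n entries, and (when n ≥ 17, so the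
-- top finder band keeps columns 8..n-9) its rows 0..7 must have ≥ n-8 entries; for
-- n ≤ 8 no cell is ever read and A returns for any shapes.
def Pre_lecture_matrice (llqr : List (List (List Int))) : Prop :=
  llqr ≠ [] ∧
  (9 ≤ llqr.headI.length →
    ∀ mat ∈ llqr,
      llqr.headI.length ≤ mat.length ∧
      (∀ row ∈ (mat.drop 8).take (llqr.headI.length - 8), llqr.headI.length ≤ row.length) ∧
      (17 ≤ llqr.headI.length → ∀ row ∈ mat.take 8, llqr.headI.length - 8 ≤ row.length))
instance (llqr : List (List (List Int))) : Decidable (Pre_lecture_matrice llqr) := by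
  unfold Pre_lecture_matrice; infer_instance

def pvWitness_lecture_matrice : List (List (List Int)) := [[[1, 2], [3, 4]]]

def Spec_lecture_matrice (llqr : List (List (List Int))) (out : List (List Int)) : Prop := out = lecture_matrice_alt llqr
instance (llqr : List (List (List Int))) (out : List (List Int)) : Decidable (Spec_lecture_matrice llqr out) := by unfold Spec_lecture_matrice; infer_instance

-- ===== CLAIM (what is proved, stated in full; the proofs are below) =====
def Claim_equal_lecture_matrice : Prop := ∀ (llqr : List (List (List Int))), Dom_lecture_matrice llqr → Pre_lecture_matrice llqr → Spec_lecture_matrice llqr (lecture_matrice llqr)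

-- ===== LEMMAS AND PROOFS =====

-- normal form of A's per-matrix value
def ARow (n : Int) (mat : List (List Int)) : List Int :=
  (PySem.List.pyRange 0 n).flatMap (fun x =>
    ((PySem.List.pyRange 0 n).filter (fun y => zone_a_lire x y n)).map
      (fun y => PySem.List.pyGetD (PySem.List.pyGetD mat x ([] : List Int)) y 0))

-- normal form of B's per-matrix value
def BRow (n : Int) (mat : List (List Int)) : List Int :=
  (PySem.List.enumerate (PySem.List.slice mat none (some n))).flatMap (fun p =>
    if p.1 < 8 then PySem.List.slice p.2 (some 8) (some (max 0 (n - 8)))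
    else if p.1 > n - 9 then PySem.List.slice p.2 (some 8) (some n)
    else PySem.List.slice p.2 none (some n))

lemma flatMap_congr_mem {α β : Type} {f g : α → List β} {l : List α}
    (h : ∀ x ∈ l, f x = g x) : l.flatMap f = l.flatMap g := by
  simp only [List.flatMap]; rw [List.map_congr_left h]

lemma map_comp_pyGetD {α β : Type} (xs : List α) (d : α) (G : α → β) :
    (PySem.List.pyRange 0 (xs.length : Int)).map (fun j => G (PySem.List.pyGetD xs j d)) = xs.map G := by
  conv_rhs => rw [← PySem.List.map_pyGetD_pyRange_zero' xs d]
  rw [List.map_map]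
  rfl

lemma flatMap_singleton_map {α β : Type} (l : List α) (f : α → β) :
    l.flatMap (fun x => [f x]) = l.map f := by
  induction l with
  | nil => rfl
  | cons a l ih => simp [List.flatMap_cons, ih]

lemma A_eq_map (llqr : List (List (List Int))) :
    lecture_matrice llqr = llqr.map (ARow ((PySem.List.pyGetD llqr 0 ([] : List (List Int))).length : Int)) := by
  unfold lecture_matrice
  simp only [PySem.List.foldl_append_if, PySem.List.foldl_append_eq_flatMap, List.nil_append]
  rw [flatMap_singleton_map]
  exact map_comp_pyGetD llqr [] (ARow ((PySem.List.pyGetD llqr 0 ([] : List (List Int))).length : Int))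

lemma B_eq_map (llqr : List (List (List Int))) :
    lecture_matrice_alt llqr = llqr.map (BRow ((PySem.List.pyGetD llqr 0 ([] : List (List Int))).length : Int)) := by
  unfold lecture_matrice_alt
  have hbody : ∀ (n : Int) (mat : List (List Int)),
      (PySem.List.enumerate (PySem.List.slice mat none (some n))).foldl
        (fun qr p =>
          if p.1 < 8 then qr ++ PySem.List.slice p.2 (some 8) (some (max 0 (n - 8)))
          else if p.1 > n - 9 then qr ++ PySem.List.slice p.2 (some 8) (some n)
          else qr ++ PySem.List.slice p.2 none (some n))
        ([] : List Int) = BRow n mat := by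
    intro n mat
    have : (fun (qr : List Int) (p : Int × List Int) =>
        if p.1 < 8 then qr ++ PySem.List.slice p.2 (some 8) (some (max 0 (n - 8)))
        else if p.1 > n - 9 then qr ++ PySem.List.slice p.2 (some 8) (some n)
        else qr ++ PySem.List.slice p.2 none (some n)) =
        (fun (qr : List Int) (p : Int × List Int) => qr ++
          (if p.1 < 8 then PySem.List.slice p.2 (some 8) (some (max 0 (n - 8)))
           else if p.1 > n - 9 then PySem.List.slice p.2 (some 8) (some n)
           else PySem.List.slice p.2 none (some n))) := by
      funext qr p; split_ifs <;> rfl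
    rw [this, PySem.List.foldl_append_eq_flatMap, List.nil_append, BRow]
  simp only [hbody, PySem.List.foldl_append_singleton_eq_map, List.nil_append]

lemma enumerate_mem_fst {α : Type} :
    ∀ (xs : List α) (s : Int) (p : Int × α), p ∈ PySem.List.enumerate xs s →
      s ≤ p.1 ∧ p.1 < s + xs.length := by
  intro xs
  induction xs with
  | nil => intro s p hp; rw [PySem.List.enumerate_nil] at hp; cases hp
  | cons x xs ih =>
    intro s p hp
    rw [PySem.List.enumerate_cons] at hp
    rcases List.mem_cons.mp hp with h | h
    · subst h
      refine ⟨le_refl s, ?_⟩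
      simp only [List.length_cons]
      push_cast
      omega
    · have := ih (s + 1) p h
      simp only [List.length_cons]
      push_cast
      omega

lemma enumerate_eq_map_range {α : Type} (d : α) :
    ∀ (xs : List α) (s : Int), PySem.List.enumerate xs s =
      (List.range xs.length).map (fun (k : Nat) => ((s + (k : Int) : Int), xs.getD k d)) := by
  intro xs
  induction xs with
  | nil => intro s; rw [PySem.List.enumerate_nil]; simp
  | cons x xs ih =>
    intro s
    rw [PySem.List.enumerate_cons, ih (s + 1), List.length_cons, List.range_succ_eq_map,
      List.map_cons, List.map_map]
    congr 1
    · simp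
    · apply List.map_congr_left
      intro k _
      simp only [Function.comp_apply, Nat.succ_eq_add_one, List.getD_cons_succ]
      congr 1
      push_cast
      ring

lemma filter_band (c d : Int) :
    ∀ (k : Nat) (a b : Int), (b - a).toNat = k →
      (PySem.List.pyRange a b).filter (fun y => decide (c ≤ y ∧ y < d)) =
        PySem.List.pyRange (max a c) (min b d) := by
  intro k
  induction k with
  | zero =>
    intro a b h
    rw [PySem.List.pyRange_one_eq_nil (by omega), PySem.List.pyRange_one_eq_nil (by omega),
      List.filter_nil]
  | succ k ih =>
    intro a b h
    have hab : a < b := by omega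
    rw [PySem.List.pyRange_one_cons hab, List.filter_cons]
    by_cases hc : c ≤ a ∧ a < d
    · rw [if_pos (by simpa using hc)]
      have h1 : max a c = a := by omega
      have h2 : a < min b d := by omega
      rw [ih (a + 1) b (by omega), h1, PySem.List.pyRange_one_cons h2]
      have h3 : max (a + 1) c = a + 1 := by omega
      rw [h3]
    · rw [if_neg (by simpa using hc)]
      rw [ih (a + 1) b (by omega)]
      rcases not_and_or.mp hc with h' | h'
      · have : max (a + 1) c = max a c := by omega
        rw [this]
      · rw [PySem.List.pyRange_one_eq_nil (by omega), PySem.List.pyRange_one_eq_nil (by omega)]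

lemma map_getD_slice (row : List Int) (a b : Int) (h0 : 0 ≤ a) (hb0 : 0 ≤ b)
    (hb : b ≤ (row.length : Int)) :
    (PySem.List.pyRange a b).map (fun y => PySem.List.pyGetD row y 0) =
      PySem.List.slice row (some a) (some b) := by
  rw [PySem.List.slice_toNat row h0 hb0]
  apply List.ext_getElem
  · simp only [List.length_map, PySem.List.length_pyRange_one, List.length_take,
      List.length_drop]
    omega
  · intro i h1 h2
    simp only [List.getElem_map, PySem.List.getElem_pyRange_one, List.getElem_take,
      List.getElem_drop]
    have hi : (i : Int) < b - a := by
      have := h1; simp only [List.length_map, PySem.List.length_pyRange_one] at this; omega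
    rw [PySem.List.pyGetD_eq_getElem row 0 (by omega) (by omega)]
    congr 1
    omega

-- the per-row equality: A's kept cells of row x = B's slice of row x
lemma row_eq (N : Nat) (mat : List (List Int))
    (hlen : 9 ≤ N → N ≤ mat.length)
    (hmid : 9 ≤ N → ∀ row ∈ (mat.drop 8).take (N - 8), N ≤ row.length)
    (htop : 17 ≤ N → ∀ row ∈ mat.take 8, N - 8 ≤ row.length) :
    ARow (N : Int) mat = BRow (N : Int) mat := by
  by_cases h9 : 9 ≤ N
  · -- the matrix is large enough to have finder patterns: compare row by row
    have hlen' := hlen h9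
    have hmid' := hmid h9
    -- every row 8 ≤ x < N has length ≥ N
    have hrow : ∀ (x : Int), 8 ≤ x → x < (N : Int) →
        (N : Int) ≤ ((PySem.List.pyGetD mat x ([] : List Int)).length : Int) := by
      intro x hx1 hx2
      have hxlen : x < (mat.length : Int) := by omega
      rw [PySem.List.pyGetD_eq_getElem mat ([] : List Int) (by omega) hxlen]
      have hb1 : x.toNat - 8 < ((mat.drop 8).take (N - 8)).length := by
        simp only [List.length_take, List.length_drop]; omega
      have he : ((mat.drop 8).take (N - 8))[x.toNat - 8] = mat[x.toNat] := by
        rw [List.getElem_take, List.getElem_drop]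
        congr 1
        omega
      have hm : mat[x.toNat] ∈ (mat.drop 8).take (N - 8) := he ▸ List.getElem_mem hb1
      have := hmid' _ hm
      omega
    -- every row x < 8 has length ≥ N - 8 when N ≥ 17
    have htoprow : 17 ≤ N → ∀ (x : Int), 0 ≤ x → x < 8 →
        (N : Int) - 8 ≤ ((PySem.List.pyGetD mat x ([] : List Int)).length : Int) := by
      intro h17 x hx1 hx2
      have hxlen : x < (mat.length : Int) := by omega
      rw [PySem.List.pyGetD_eq_getElem mat ([] : List Int) hx1 hxlen]
      have hb1 : x.toNat < (mat.take 8).length := by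
        simp only [List.length_take]; omega
      have he : (mat.take 8)[x.toNat] = mat[x.toNat] := List.getElem_take
      have hm : mat[x.toNat] ∈ mat.take 8 := he ▸ List.getElem_mem hb1
      have := htop h17 _ hm
      omega
    have htake : (mat.take N).length = N := by
      simp only [List.length_take]; omega
    unfold BRow
    rw [PySem.List.slice_to mat (by omega : (0 : Int) ≤ (N : Int)), Int.toNat_natCast,
      enumerate_eq_map_range ([] : List Int) (mat.take N) 0, htake, List.flatMap_map]
    unfold ARow
    rw [PySem.List.pyRange_zero_natCast N, List.flatMap_map]
    apply flatMap_congr_mem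
    intro k hk
    have hkN : k < N := List.mem_range.mp hk
    have hget : (mat.take N).getD k ([] : List Int) = PySem.List.pyGetD mat (k : Int) ([] : List Int) := by
      rw [PySem.List.pyGetD_natCast]
      simp [List.getD_eq_getElem?_getD, hkN]
    simp only [hget]
    set row := PySem.List.pyGetD mat (k : Int) ([] : List Int) with hrowdef
    by_cases hk8 : k < 8
    · -- top finder band: keep columns 8 .. N-9
      rw [if_pos (by omega : (0 + (k : Int), row).1 < 8)]
      rw [List.filter_congr (q := fun y => decide ((8 : Int) ≤ y ∧ y < (N : Int) - 8)) ?_]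
      · rw [← PySem.List.pyRange_zero_natCast N]
        rw [filter_band 8 ((N : Int) - 8) ((N : Int) - 0).toNat 0 (N : Int) rfl,
          (by omega : max (0 : Int) 8 = 8), (by omega : min (N : Int) ((N : Int) - 8) = (N : Int) - 8),
          (by omega : max (0 : Int) ((N : Int) - 8) = (N : Int) - 8)]
        by_cases h17 : 17 ≤ N
        · exact map_getD_slice row 8 ((N : Int) - 8) (by omega) (by omega)
            (htoprow h17 (k : Int) (by omega) (by omega))
        · rw [PySem.List.pyRange_one_eq_nil (by omega), List.map_nil,
            PySem.List.slice_toNat row (by omega) (by omega),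
            (by omega : ((N : Int) - 8).toNat - ((8 : Int)).toNat = 0), List.take_zero]
      · intro y hy
        rw [← PySem.List.pyRange_zero_natCast N] at hy
        have hym := PySem.List.mem_pyRange_one.mp hy
        unfold zone_a_lire
        by_cases hy8 : y < 8
        · rw [if_pos ⟨by omega, hy8⟩]
          simp only [false_eq_decide_iff]
          omega
        · rw [if_neg (by omega)]
          by_cases hyhi : y > (N : Int) - 9
          · rw [if_pos ⟨by omega, hyhi⟩]
            simp only [false_eq_decide_iff]
            omega
          · rw [if_neg (by omega), if_neg (by omega)]
            simp only [true_eq_decide_iff]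
            omega
    · by_cases hklo : (k : Int) > (N : Int) - 9
      · -- bottom finder band: keep columns 8 .. N-1
        rw [if_neg (by omega : ¬ (0 + (k : Int), row).1 < 8),
          if_pos (by omega : (0 + (k : Int), row).1 > (N : Int) - 9)]
        rw [List.filter_congr (q := fun y => decide ((8 : Int) ≤ y ∧ y < (N : Int))) ?_]
        · rw [← PySem.List.pyRange_zero_natCast N]
          rw [filter_band 8 (N : Int) ((N : Int) - 0).toNat 0 (N : Int) rfl,
            (by omega : max (0 : Int) 8 = 8), (by omega : min (N : Int) (N : Int) = (N : Int))]
          exact map_getD_slice row 8 (N : Int) (by omega) (by omega)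
            (hrow (k : Int) (by omega) (by omega))
        · intro y hy
          rw [← PySem.List.pyRange_zero_natCast N] at hy
          have hym := PySem.List.mem_pyRange_one.mp hy
          unfold zone_a_lire
          rw [if_neg (by omega), if_neg (by omega)]
          by_cases hy8 : y < 8
          · rw [if_pos ⟨by omega, hy8⟩]
            simp only [false_eq_decide_iff]
            omega
          · rw [if_neg (by omega)]
            simp only [true_eq_decide_iff]
            omega
      · -- middle rows: keep every column
        rw [if_neg (by omega : ¬ (0 + (k : Int), row).1 < 8),
          if_neg (by omega : ¬ (0 + (k : Int), row).1 > (N : Int) - 9)]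
        rw [List.filter_congr (q := fun y => decide ((0 : Int) ≤ y ∧ y < (N : Int))) ?_]
        · rw [← PySem.List.pyRange_zero_natCast N]
          rw [filter_band 0 (N : Int) ((N : Int) - 0).toNat 0 (N : Int) rfl,
            (by omega : max (0 : Int) 0 = 0), (by omega : min (N : Int) (N : Int) = (N : Int))]
          rw [← PySem.List.slice_zero_start row (some (N : Int))]
          exact map_getD_slice row 0 (N : Int) (by omega) (by omega)
            (hrow (k : Int) (by omega) (by omega))
        · intro y hy
          rw [← PySem.List.pyRange_zero_natCast N] at hy
          have hym := PySem.List.mem_pyRange_one.mp hy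
          unfold zone_a_lire
          rw [if_neg (by omega), if_neg (by omega), if_neg (by omega)]
          simp only [true_eq_decide_iff]
          omega
  · -- N ≤ 8: every cell is inside a finder corner, both sides are empty
    have hN8 : N ≤ 8 := by omega
    have hA : ARow (N : Int) mat = [] := by
      rw [ARow, List.flatMap_eq_nil_iff]
      intro x hx
      have hxm := PySem.List.mem_pyRange_one.mp hx
      have hf : (PySem.List.pyRange 0 (N : Int)).filter (fun y => zone_a_lire x y (N : Int)) = [] := by
        rw [List.filter_eq_nil_iff]
        intro y hy
        have hym := PySem.List.mem_pyRange_one.mp hy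
        unfold zone_a_lire
        rw [if_pos ⟨by omega, by omega⟩]
        simp
      rw [hf, List.map_nil]
    have hB : BRow (N : Int) mat = [] := by
      rw [BRow, List.flatMap_eq_nil_iff]
      intro p hp
      have hpm := enumerate_mem_fst _ 0 p hp
      have hsl : (PySem.List.slice mat none (some (N : Int))).length ≤ N := by
        rw [PySem.List.slice_to mat (by omega : (0 : Int) ≤ (N : Int)), Int.toNat_natCast]
        exact List.length_take_le ..
      rw [if_pos (show p.1 < 8 by omega)]
      rw [(by omega : max (0 : Int) ((N : Int) - 8) = 0)]
      rw [PySem.List.slice_toNat p.2 (by omega) (by omega)]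
      simp
    rw [hA, hB]

theorem lecture_matrice_eq (llqr : List (List (List Int))) (h : Pre_lecture_matrice llqr) :
    lecture_matrice llqr = lecture_matrice_alt llqr := by
  obtain ⟨hne, h9⟩ := h
  rw [A_eq_map, B_eq_map]
  apply List.map_congr_left
  intro mat hmat
  have hhead : PySem.List.pyGetD llqr 0 ([] : List (List Int)) = llqr.headI := by
    cases llqr with
    | nil => exact absurd rfl hne
    | cons m0 rest => rw [PySem.List.pyGetD_zero_cons]; rfl
  rw [hhead]
  exact row_eq llqr.headI.length mat
    (fun h => (h9 h mat hmat).1)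
    (fun h => (h9 h mat hmat).2.1)
    (fun h => (h9 (by omega) mat hmat).2.2 h)

-- ===== VERDICT (by name: the statement is the Claim_ definition above) =====
theorem lecture_matrice_spec : Claim_equal_lecture_matrice := by
  intro llqr _ hpre
  unfold Spec_lecture_matrice
  exact lecture_matrice_eq llqr hpre
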